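-- pv_equiv track=rewrite | github.com/eriakul/csv2graph | prototype.py | rows_to_columns
-- ===== SOURCE A (Python) =====
-- def rows_to_columns(rows, list_of_column_indexes):
--     list_of_columns = []
--     for i in list_of_column_indexes:
--         column = []
--         for j in range(len(rows)):
--             column.append(rows[j][i])
--         list_of_columns.append(column)
--     return list_of_columns
-- ===== SOURCE B (Python) =====
-- def rows_to_columns(rows, list_of_column_indexes):
--     # One row-major sweep: preinitialize one empty column per requested index,
--     # then distribute each row's entries into the matching columns.
--     columns = [[] for _ in list_of_column_indexes]
--     for row in rows:
--         for k, i in enumerate(list_of_column_indexes):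
--             columns[k].append(row[i])
--     return columns
-- ===== Notes on version B (the rewrite author's own statement) =====
-- stated objective: alternative
-- what changed: Replaces A's column-at-a-time construction (outer loop over indexes, inner loop re-scanning all rows per column) with preinitialized empty columns filled in a single row-major sweep that distributes each row's entries into all columns at once.
import Mathlib
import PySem

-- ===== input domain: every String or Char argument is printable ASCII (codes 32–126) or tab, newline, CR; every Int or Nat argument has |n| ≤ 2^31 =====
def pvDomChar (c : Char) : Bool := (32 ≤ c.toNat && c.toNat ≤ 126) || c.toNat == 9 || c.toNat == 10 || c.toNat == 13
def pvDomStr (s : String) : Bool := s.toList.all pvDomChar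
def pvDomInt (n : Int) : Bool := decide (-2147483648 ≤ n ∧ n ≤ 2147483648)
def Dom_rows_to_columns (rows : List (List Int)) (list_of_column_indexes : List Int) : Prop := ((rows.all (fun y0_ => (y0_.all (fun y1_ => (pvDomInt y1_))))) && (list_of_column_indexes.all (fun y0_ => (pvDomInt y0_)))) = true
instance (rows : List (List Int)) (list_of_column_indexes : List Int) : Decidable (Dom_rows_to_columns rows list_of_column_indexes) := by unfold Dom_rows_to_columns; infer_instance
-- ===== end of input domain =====

-- B fills preinitialized columns in one row-major sweep instead of A's column-at-a-time inner loops (alternative decomposition, same cost).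

-- ===== PORT A =====
-- outer loop over indexes; inner loop 'for j in range(len(rows))' appending rows[j][i]
def rows_to_columns (rows : List (List Int)) (list_of_column_indexes : List Int) : List (List Int) :=
  list_of_column_indexes.foldl (fun list_of_columns i =>
    list_of_columns ++
      [ (PySem.List.pyRange 0 rows.length 1).foldl
          (fun column j => column ++ [PySem.List.pyGetD (PySem.List.pyGetD rows j []) i 0]) [] ])
    []

-- ===== PORT B =====
-- preinitialize one empty column per index, then one sweep over rows distributing row[i] into each column
def rows_to_columns_alt (rows : List (List Int)) (list_of_column_indexes : List Int) : List (List Int) :=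
  rows.foldl (fun columns row =>
      List.zipWith (fun column i => column ++ [PySem.List.pyGetD row i 0]) columns list_of_column_indexes)
    (list_of_column_indexes.map (fun _ => ([] : List Int)))

-- ===== PRECONDITION & SPEC =====
-- Pre_ excludes exactly the inputs where Python A raises IndexError: some requested index out of range for some row.
def Pre_rows_to_columns (rows : List (List Int)) (list_of_column_indexes : List Int) : Prop :=
  ∀ row ∈ rows, ∀ i ∈ list_of_column_indexes, PySem.Raise.InRange row.length i
instance (rows : List (List Int)) (list_of_column_indexes : List Int) : Decidable (Pre_rows_to_columns rows list_of_column_indexes) := by unfold Pre_rows_to_columns; infer_instance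
def pvWitness_rows_to_columns : List (List Int) × List Int := ([[1, 2], [3, 4], [5, 6]], [1, 0, -1])

def Spec_rows_to_columns (rows : List (List Int)) (list_of_column_indexes : List Int) (out : List (List Int)) : Prop := out = rows_to_columns_alt rows list_of_column_indexes
instance (rows : List (List Int)) (list_of_column_indexes : List Int) (out : List (List Int)) : Decidable (Spec_rows_to_columns rows list_of_column_indexes out) := by unfold Spec_rows_to_columns; infer_instance

-- ===== CLAIM (what is proved, stated in full; the proofs are below) =====
def Claim_equal_rows_to_columns : Prop := ∀ (rows : List (List Int)) (list_of_column_indexes : List Int), Dom_rows_to_columns rows list_of_column_indexes → Pre_rows_to_columns rows list_of_column_indexes → Spec_rows_to_columns rows list_of_column_indexes (rows_to_columns rows list_of_column_indexes)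

-- ===== LEMMAS AND PROOFS =====

-- the list rebuilt by reading indexes 0..len-1 with a default is the list itself
theorem pv_map_range_getD {α : Type} (xs : List α) (d : α) :
    (List.range xs.length).map (fun k => xs.getD k d) = xs := by
  apply List.ext_getElem
  · simp
  · intro k h1 h2
    simp [List.getD_eq_getElem?_getD, List.getElem?_eq_getElem h2]

-- A's inner loop over range(len(rows)) collects column i of every row
theorem pv_rows_to_columns_char (rows : List (List Int)) (idxs : List Int) :
    rows_to_columns rows idxs =
      idxs.map (fun i => rows.map (fun row => PySem.List.pyGetD row i 0)) := by
  unfold rows_to_columns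
  rw [PySem.List.foldl_append_singleton_eq_map]
  refine List.map_congr_left (fun i _ => ?_)
  rw [PySem.List.foldl_append_singleton_eq_map, PySem.List.pyRange_zero_nat, List.map_map]
  have : ((fun j => PySem.List.pyGetD (PySem.List.pyGetD rows j []) i 0) ∘ fun k : Nat => (k : Int))
      = fun k : Nat => PySem.List.pyGetD (rows.getD k []) i 0 := by
    funext k; simp [PySem.List.pyGetD_natCast]
  rw [this]
  have := pv_map_range_getD rows []
  calc (List.range rows.length).map (fun k => PySem.List.pyGetD (rows.getD k []) i 0)
      = ((List.range rows.length).map (fun k => rows.getD k [])).map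
          (fun row => PySem.List.pyGetD row i 0) := by simp [List.map_map, Function.comp]
    _ = rows.map (fun row => PySem.List.pyGetD row i 0) := by rw [pv_map_range_getD]

-- zipping a mapped copy of a list against the list itself is a map over the list
theorem pv_zipWith_map_self {α β : Type} (g : β → α → β) (f : α → β) (l : List α) :
    List.zipWith g (l.map f) l = l.map (fun a => g (f a) a) := by
  induction l with
  | nil => rfl
  | cons a l ih => simp [ih]

-- B's sweep over rows, started from columns (map f idxs), appends each row's entry to every column
theorem pv_alt_invariant (rows : List (List Int)) (idxs : List Int) (f : Int → List Int) :
    rows.foldl (fun columns row =>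
        List.zipWith (fun column i => column ++ [PySem.List.pyGetD row i 0]) columns idxs)
      (idxs.map f)
    = idxs.map (fun i => f i ++ rows.map (fun row => PySem.List.pyGetD row i 0)) := by
  induction rows generalizing f with
  | nil => simp
  | cons r rs ih =>
    simp only [List.foldl_cons]
    rw [pv_zipWith_map_self]
    rw [ih (fun i => f i ++ [PySem.List.pyGetD r i 0])]
    refine List.map_congr_left (fun i _ => ?_)
    simp

theorem pv_alt_char (rows : List (List Int)) (idxs : List Int) :
    rows_to_columns_alt rows idxs =
      idxs.map (fun i => rows.map (fun row => PySem.List.pyGetD row i 0)) := by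
  unfold rows_to_columns_alt
  rw [pv_alt_invariant rows idxs (fun _ => [])]
  simp

-- ===== VERDICT (by name: the statement is the Claim_ definition above) =====
theorem rows_to_columns_spec : Claim_equal_rows_to_columns := by
  intro rows idxs _ _
  unfold Spec_rows_to_columns
  rw [pv_rows_to_columns_char, pv_alt_char]
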